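-- pv_equiv track=rewrite | github.com/GeoFFerDev/shenanigans | lua_deobfuscator.py | _build_countermeasures
-- ===== SOURCE A (Python) =====
-- from typing import List, Dict, Optional, Tuple, Any
--
-- def _build_countermeasures(r: Dict) -> List[str]:
--     lines = []
--     susps = r.get("suspicious_apis", [])
--
--     if "FireServer" in susps or "InvokeServer" in susps:
--         lines += [
--             "  Remote abuse detected:",
--             "  → Monitor outgoing FireServer/InvokeServer calls with a hook.",
--             "  → Validate all RemoteEvent/RemoteFunction arguments server-side.",
--             "  → Add rate-limiting and type checking on all remotes.",
--         ]
--     if "loadstring" in susps or "LoadString" in susps: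
--         lines += [
--             "  Dynamic code execution (loadstring) detected:",
--             "  → Disable loadstring in the Roblox game settings if unused.",
--             "  → Sandbox environments that accept arbitrary strings.",
--         ]
--     if any(x in susps for x in ["syn","rconsole","getgenv","hookfunction","newcclosure"]):
--         lines += [
--             "  Exploit executor API detected (syn/rconsole/getgenv):",
--             "  → These APIs only exist in exploit environments (Synapse X, etc.).",
--             "  → Add server-side sanity checks: verify character state, speed, position.",
--             "  → Implement anti-cheat heartbeat checks for movement/health anomalies.",
--         ]
--     if "HttpGet" in susps or "HttpPost" in susps or "RequestAsync" in susps: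
--         lines += [
--             "  HTTP exfiltration/C2 detected:",
--             "  → Review all outbound HTTP calls on the server.",
--             "  → Block unauthorized domains via Roblox HTTP whitelist.",
--         ]
--     if "readfile" in susps or "writefile" in susps:
--         lines += [
--             "  Filesystem access detected (readfile/writefile):",
--             "  → These run on the client only via an executor.",
--             "  → Does not affect server, but signals a client-side cheat.",
--         ]
--     if not lines:
--         lines = ["  No specific countermeasures triggered.  Review API hits manually."]
--     return lines
-- ===== SOURCE B (Python) =====
-- from typing import List, Dict
--
-- # Advice blocks, in the original output order.
-- _ADVICE = [
--     ["  Remote abuse detected:",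
--      "  → Monitor outgoing FireServer/InvokeServer calls with a hook.",
--      "  → Validate all RemoteEvent/RemoteFunction arguments server-side.",
--      "  → Add rate-limiting and type checking on all remotes."],
--     ["  Dynamic code execution (loadstring) detected:",
--      "  → Disable loadstring in the Roblox game settings if unused.",
--      "  → Sandbox environments that accept arbitrary strings."],
--     ["  Exploit executor API detected (syn/rconsole/getgenv):",
--      "  → These APIs only exist in exploit environments (Synapse X, etc.).",
--      "  → Add server-side sanity checks: verify character state, speed, position.",
--      "  → Implement anti-cheat heartbeat checks for movement/health anomalies."],
--     ["  HTTP exfiltration/C2 detected:",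
--      "  → Review all outbound HTTP calls on the server.",
--      "  → Block unauthorized domains via Roblox HTTP whitelist."],
--     ["  Filesystem access detected (readfile/writefile):",
--      "  → These run on the client only via an executor.",
--      "  → Does not affect server, but signals a client-side cheat."],
-- ]
--
-- # Inverted index: suspicious API name -> index of the advice block it triggers.
-- _TRIGGER_BLOCK = {
--     "FireServer": 0, "InvokeServer": 0,
--     "loadstring": 1, "LoadString": 1,
--     "syn": 2, "rconsole": 2, "getgenv": 2, "hookfunction": 2, "newcclosure": 2,
--     "HttpGet": 3, "HttpPost": 3, "RequestAsync": 3,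
--     "readfile": 4, "writefile": 4,
-- }
--
-- def _build_countermeasures(r: Dict) -> List[str]:
--     fired = set()
--     for name in r.get("suspicious_apis", []):
--         idx = _TRIGGER_BLOCK.get(name)
--         if idx is not None:
--             fired.add(idx)
--     lines = [ln for i, advice in enumerate(_ADVICE) if i in fired for ln in advice]
--     return lines or ["  No specific countermeasures triggered.  Review API hits manually."]
-- ===== Notes on version B (the rewrite author's own statement) =====
-- stated objective: alternative
-- what changed: Inverted the scan: instead of testing the suspicious-API list for membership of each hardcoded trigger per block, B makes a single pass over the suspicious APIs through a trigger-to-block hash index, collects the set of fired block indices, and then emits the advice blocks whose index fired.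
import Mathlib
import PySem

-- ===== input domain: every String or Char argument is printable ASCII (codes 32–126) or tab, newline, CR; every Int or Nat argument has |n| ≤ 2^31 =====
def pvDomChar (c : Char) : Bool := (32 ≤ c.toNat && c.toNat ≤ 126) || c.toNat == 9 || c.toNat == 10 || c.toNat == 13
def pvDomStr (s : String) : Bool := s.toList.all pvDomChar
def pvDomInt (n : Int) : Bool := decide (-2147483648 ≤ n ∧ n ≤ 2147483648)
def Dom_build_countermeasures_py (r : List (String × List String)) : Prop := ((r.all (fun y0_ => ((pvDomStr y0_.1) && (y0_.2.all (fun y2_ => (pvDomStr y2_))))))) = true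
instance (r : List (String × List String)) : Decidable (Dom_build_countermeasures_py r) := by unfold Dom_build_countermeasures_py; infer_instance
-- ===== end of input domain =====

-- B inverts the scan: one pass over the suspicious APIs through a trigger→block index,
-- collecting the set of fired block indices, then emitting the fired advice blocks (alternative structure, same output).

-- ===== PORT A =====
def build_countermeasures_py (r : List (String × List String)) : List String :=
  let susps := PySem.Dict.getD (PySem.Dict.mk r) "suspicious_apis" []
  let lines : List String := []
  let lines := if susps.contains "FireServer" || susps.contains "InvokeServer" then
      lines ++ [
        "  Remote abuse detected:",
        "  → Monitor outgoing FireServer/InvokeServer calls with a hook.",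
        "  → Validate all RemoteEvent/RemoteFunction arguments server-side.",
        "  → Add rate-limiting and type checking on all remotes."]
    else lines
  let lines := if susps.contains "loadstring" || susps.contains "LoadString" then
      lines ++ [
        "  Dynamic code execution (loadstring) detected:",
        "  → Disable loadstring in the Roblox game settings if unused.",
        "  → Sandbox environments that accept arbitrary strings."]
    else lines
  let lines := if (["syn","rconsole","getgenv","hookfunction","newcclosure"] : List String).any
      (fun x => susps.contains x) then
      lines ++ [
        "  Exploit executor API detected (syn/rconsole/getgenv):",
        "  → These APIs only exist in exploit environments (Synapse X, etc.).",
        "  → Add server-side sanity checks: verify character state, speed, position.",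
        "  → Implement anti-cheat heartbeat checks for movement/health anomalies."]
    else lines
  let lines := if susps.contains "HttpGet" || susps.contains "HttpPost" || susps.contains "RequestAsync" then
      lines ++ [
        "  HTTP exfiltration/C2 detected:",
        "  → Review all outbound HTTP calls on the server.",
        "  → Block unauthorized domains via Roblox HTTP whitelist."]
    else lines
  let lines := if susps.contains "readfile" || susps.contains "writefile" then
      lines ++ [
        "  Filesystem access detected (readfile/writefile):",
        "  → These run on the client only via an executor.",
        "  → Does not affect server, but signals a client-side cheat."]
    else lines
  if lines.isEmpty then ["  No specific countermeasures triggered.  Review API hits manually."]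
  else lines

-- ===== PORT B =====
-- _ADVICE: the advice blocks, in the original output order
def pvAdvice : List (List String) :=
  [ ["  Remote abuse detected:",
     "  → Monitor outgoing FireServer/InvokeServer calls with a hook.",
     "  → Validate all RemoteEvent/RemoteFunction arguments server-side.",
     "  → Add rate-limiting and type checking on all remotes."],
    ["  Dynamic code execution (loadstring) detected:",
     "  → Disable loadstring in the Roblox game settings if unused.",
     "  → Sandbox environments that accept arbitrary strings."],
    ["  Exploit executor API detected (syn/rconsole/getgenv):",
     "  → These APIs only exist in exploit environments (Synapse X, etc.).",
     "  → Add server-side sanity checks: verify character state, speed, position.",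
     "  → Implement anti-cheat heartbeat checks for movement/health anomalies."],
    ["  HTTP exfiltration/C2 detected:",
     "  → Review all outbound HTTP calls on the server.",
     "  → Block unauthorized domains via Roblox HTTP whitelist."],
    ["  Filesystem access detected (readfile/writefile):",
     "  → These run on the client only via an executor.",
     "  → Does not affect server, but signals a client-side cheat."] ]

-- _TRIGGER_BLOCK: inverted index, suspicious API name → advice-block index
def pvTriggerBlock : PySem.Dict String Int :=
  PySem.Dict.mk
    [ ("FireServer", 0), ("InvokeServer", 0),
      ("loadstring", 1), ("LoadString", 1),
      ("syn", 2), ("rconsole", 2), ("getgenv", 2), ("hookfunction", 2), ("newcclosure", 2),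
      ("HttpGet", 3), ("HttpPost", 3), ("RequestAsync", 3),
      ("readfile", 4), ("writefile", 4) ]

def build_countermeasures_py_alt (r : List (String × List String)) : List String :=
  let fired : PySem.Set Int :=
    (PySem.Dict.getD (PySem.Dict.mk r) "suspicious_apis" []).foldl
      (fun fired name =>
        match PySem.Dict.get? pvTriggerBlock name with
        | some idx => PySem.Set.add fired idx
        | none => fired)
      PySem.Set.empty
  let lines := (PySem.List.enumerate pvAdvice).flatMap
    (fun p => if PySem.Set.contains fired p.1 then p.2 else [])
  if lines.isEmpty then ["  No specific countermeasures triggered.  Review API hits manually."]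
  else lines

-- ===== PRECONDITION & SPEC =====
def Spec_build_countermeasures_py (r : List (String × List String)) (out : List String) : Prop := out = build_countermeasures_py_alt r
instance (r : List (String × List String)) (out : List String) : Decidable (Spec_build_countermeasures_py r out) := by unfold Spec_build_countermeasures_py; infer_instance

-- ===== CLAIM (what is proved, stated in full; the proofs are below) =====
def Claim_equal_build_countermeasures_py : Prop := ∀ (r : List (String × List String)), Dom_build_countermeasures_py r → Spec_build_countermeasures_py r (build_countermeasures_py r)

-- ===== LEMMAS AND PROOFS =====

-- the fold that builds `fired`
def pvStep (fired : PySem.Set Int) (name : String) : PySem.Set Int :=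
  match PySem.Dict.get? pvTriggerBlock name with
  | some idx => PySem.Set.add fired idx
  | none => fired

theorem pv_contains_add (st : PySem.Set Int) (j i : Int) :
    PySem.Set.contains (PySem.Set.add st j) i = (PySem.Set.contains st i || i == j) := by
  simp only [PySem.Set.add]
  split_ifs with h
  · by_cases hij : i = j
    · subst hij; simp_all
    · simp [hij]
  · by_cases hij : i = j
    · subst hij; simp
    · simp [hij]

theorem pv_contains_step (st : PySem.Set Int) (s : String) (i : Int) :
    PySem.Set.contains (pvStep st s) i
      = (PySem.Set.contains st i || (PySem.Dict.get? pvTriggerBlock s == some i)) := by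
  unfold pvStep
  cases h : PySem.Dict.get? pvTriggerBlock s with
  | none => simp
  | some j =>
    rw [pv_contains_add]
    by_cases hij : i = j
    · subst hij; simp
    · rw [beq_eq_false_iff_ne.mpr hij]
      simp [Ne.symm hij]

theorem pv_contains_fold (susps : List String) (st : PySem.Set Int) (i : Int) :
    PySem.Set.contains (susps.foldl pvStep st) i
      = (PySem.Set.contains st i
         || susps.any (fun s => PySem.Dict.get? pvTriggerBlock s == some i)) := by
  induction susps generalizing st with
  | nil => simp
  | cons s rest ih =>
    simp only [List.foldl_cons, List.any_cons, ih, pv_contains_step, Bool.or_assoc]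

-- the inverted index, read back per block index
theorem pv_trig0 (s : String) :
    (PySem.Dict.get? pvTriggerBlock s == some (0 : Int))
      = (s == "FireServer" || s == "InvokeServer") := by
  by_cases h1 : s = "FireServer"; · subst h1; decide
  by_cases h2 : s = "InvokeServer"; · subst h2; decide
  by_cases h3 : s = "loadstring"; · subst h3; decide
  by_cases h4 : s = "LoadString"; · subst h4; decide
  by_cases h5 : s = "syn"; · subst h5; decide
  by_cases h6 : s = "rconsole"; · subst h6; decide
  by_cases h7 : s = "getgenv"; · subst h7; decide
  by_cases h8 : s = "hookfunction"; · subst h8; decide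
  by_cases h9 : s = "newcclosure"; · subst h9; decide
  by_cases h10 : s = "HttpGet"; · subst h10; decide
  by_cases h11 : s = "HttpPost"; · subst h11; decide
  by_cases h12 : s = "RequestAsync"; · subst h12; decide
  by_cases h13 : s = "readfile"; · subst h13; decide
  by_cases h14 : s = "writefile"; · subst h14; decide
  simp only [pvTriggerBlock, PySem.Dict.get?_mk_cons, beq_iff_eq]
  simp [PySem.Dict.get?, Ne.symm h1, Ne.symm h2, Ne.symm h3, Ne.symm h4, Ne.symm h5, Ne.symm h6, Ne.symm h7, Ne.symm h8, Ne.symm h9, Ne.symm h10, Ne.symm h11, Ne.symm h12, Ne.symm h13, Ne.symm h14, h1, h2, h3, h4, h5, h6, h7, h8, h9, h10, h11, h12, h13, h14]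

theorem pv_trig1 (s : String) :
    (PySem.Dict.get? pvTriggerBlock s == some (1 : Int))
      = (s == "loadstring" || s == "LoadString") := by
  by_cases h1 : s = "FireServer"; · subst h1; decide
  by_cases h2 : s = "InvokeServer"; · subst h2; decide
  by_cases h3 : s = "loadstring"; · subst h3; decide
  by_cases h4 : s = "LoadString"; · subst h4; decide
  by_cases h5 : s = "syn"; · subst h5; decide
  by_cases h6 : s = "rconsole"; · subst h6; decide
  by_cases h7 : s = "getgenv"; · subst h7; decide
  by_cases h8 : s = "hookfunction"; · subst h8; decide
  by_cases h9 : s = "newcclosure"; · subst h9; decide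
  by_cases h10 : s = "HttpGet"; · subst h10; decide
  by_cases h11 : s = "HttpPost"; · subst h11; decide
  by_cases h12 : s = "RequestAsync"; · subst h12; decide
  by_cases h13 : s = "readfile"; · subst h13; decide
  by_cases h14 : s = "writefile"; · subst h14; decide
  simp only [pvTriggerBlock, PySem.Dict.get?_mk_cons, beq_iff_eq]
  simp [PySem.Dict.get?, Ne.symm h1, Ne.symm h2, Ne.symm h3, Ne.symm h4, Ne.symm h5, Ne.symm h6, Ne.symm h7, Ne.symm h8, Ne.symm h9, Ne.symm h10, Ne.symm h11, Ne.symm h12, Ne.symm h13, Ne.symm h14, h1, h2, h3, h4, h5, h6, h7, h8, h9, h10, h11, h12, h13, h14]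

theorem pv_trig2 (s : String) :
    (PySem.Dict.get? pvTriggerBlock s == some (2 : Int))
      = (s == "syn" || s == "rconsole" || s == "getgenv" || s == "hookfunction" || s == "newcclosure") := by
  by_cases h1 : s = "FireServer"; · subst h1; decide
  by_cases h2 : s = "InvokeServer"; · subst h2; decide
  by_cases h3 : s = "loadstring"; · subst h3; decide
  by_cases h4 : s = "LoadString"; · subst h4; decide
  by_cases h5 : s = "syn"; · subst h5; decide
  by_cases h6 : s = "rconsole"; · subst h6; decide
  by_cases h7 : s = "getgenv"; · subst h7; decide
  by_cases h8 : s = "hookfunction"; · subst h8; decide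
  by_cases h9 : s = "newcclosure"; · subst h9; decide
  by_cases h10 : s = "HttpGet"; · subst h10; decide
  by_cases h11 : s = "HttpPost"; · subst h11; decide
  by_cases h12 : s = "RequestAsync"; · subst h12; decide
  by_cases h13 : s = "readfile"; · subst h13; decide
  by_cases h14 : s = "writefile"; · subst h14; decide
  simp only [pvTriggerBlock, PySem.Dict.get?_mk_cons, beq_iff_eq]
  simp [PySem.Dict.get?, Ne.symm h1, Ne.symm h2, Ne.symm h3, Ne.symm h4, Ne.symm h5, Ne.symm h6, Ne.symm h7, Ne.symm h8, Ne.symm h9, Ne.symm h10, Ne.symm h11, Ne.symm h12, Ne.symm h13, Ne.symm h14, h1, h2, h3, h4, h5, h6, h7, h8, h9, h10, h11, h12, h13, h14]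

theorem pv_trig3 (s : String) :
    (PySem.Dict.get? pvTriggerBlock s == some (3 : Int))
      = (s == "HttpGet" || s == "HttpPost" || s == "RequestAsync") := by
  by_cases h1 : s = "FireServer"; · subst h1; decide
  by_cases h2 : s = "InvokeServer"; · subst h2; decide
  by_cases h3 : s = "loadstring"; · subst h3; decide
  by_cases h4 : s = "LoadString"; · subst h4; decide
  by_cases h5 : s = "syn"; · subst h5; decide
  by_cases h6 : s = "rconsole"; · subst h6; decide
  by_cases h7 : s = "getgenv"; · subst h7; decide
  by_cases h8 : s = "hookfunction"; · subst h8; decide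
  by_cases h9 : s = "newcclosure"; · subst h9; decide
  by_cases h10 : s = "HttpGet"; · subst h10; decide
  by_cases h11 : s = "HttpPost"; · subst h11; decide
  by_cases h12 : s = "RequestAsync"; · subst h12; decide
  by_cases h13 : s = "readfile"; · subst h13; decide
  by_cases h14 : s = "writefile"; · subst h14; decide
  simp only [pvTriggerBlock, PySem.Dict.get?_mk_cons, beq_iff_eq]
  simp [PySem.Dict.get?, Ne.symm h1, Ne.symm h2, Ne.symm h3, Ne.symm h4, Ne.symm h5, Ne.symm h6, Ne.symm h7, Ne.symm h8, Ne.symm h9, Ne.symm h10, Ne.symm h11, Ne.symm h12, Ne.symm h13, Ne.symm h14, h1, h2, h3, h4, h5, h6, h7, h8, h9, h10, h11, h12, h13, h14]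

theorem pv_trig4 (s : String) :
    (PySem.Dict.get? pvTriggerBlock s == some (4 : Int))
      = (s == "readfile" || s == "writefile") := by
  by_cases h1 : s = "FireServer"; · subst h1; decide
  by_cases h2 : s = "InvokeServer"; · subst h2; decide
  by_cases h3 : s = "loadstring"; · subst h3; decide
  by_cases h4 : s = "LoadString"; · subst h4; decide
  by_cases h5 : s = "syn"; · subst h5; decide
  by_cases h6 : s = "rconsole"; · subst h6; decide
  by_cases h7 : s = "getgenv"; · subst h7; decide
  by_cases h8 : s = "hookfunction"; · subst h8; decide
  by_cases h9 : s = "newcclosure"; · subst h9; decide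
  by_cases h10 : s = "HttpGet"; · subst h10; decide
  by_cases h11 : s = "HttpPost"; · subst h11; decide
  by_cases h12 : s = "RequestAsync"; · subst h12; decide
  by_cases h13 : s = "readfile"; · subst h13; decide
  by_cases h14 : s = "writefile"; · subst h14; decide
  simp only [pvTriggerBlock, PySem.Dict.get?_mk_cons, beq_iff_eq]
  simp [PySem.Dict.get?, Ne.symm h1, Ne.symm h2, Ne.symm h3, Ne.symm h4, Ne.symm h5, Ne.symm h6, Ne.symm h7, Ne.symm h8, Ne.symm h9, Ne.symm h10, Ne.symm h11, Ne.symm h12, Ne.symm h13, Ne.symm h14, h1, h2, h3, h4, h5, h6, h7, h8, h9, h10, h11, h12, h13, h14]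

-- any of an or-predicate = or of contains
theorem pv_any_or (susps : List String) (p q : String → Bool) :
    susps.any (fun s => p s || q s) = (susps.any p || susps.any q) := by
  induction susps with
  | nil => rfl
  | cons s rest ih =>
    simp only [List.any_cons, ih]
    cases p s <;> cases q s <;> cases rest.any p <;> cases rest.any q <;> rfl

theorem pv_any_beq (susps : List String) (k : String) :
    susps.any (fun s => s == k) = susps.contains k := by
  induction susps with
  | nil => rfl
  | cons s rest ih =>
    simp only [List.any_cons, ih, List.contains_cons]
    by_cases h : s = k
    · simp [h]
    · rw [beq_eq_false_iff_ne.mpr h, beq_eq_false_iff_ne.mpr (Ne.symm h)]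

-- ===== VERDICT (by name: the statement is the Claim_ definition above) =====
theorem build_countermeasures_py_spec : Claim_equal_build_countermeasures_py := by
  intro r _
  unfold Spec_build_countermeasures_py build_countermeasures_py build_countermeasures_py_alt
  generalize PySem.Dict.getD (PySem.Dict.mk r) "suspicious_apis" [] = susps
  have hfold : ∀ i : Int,
      PySem.Set.contains (susps.foldl pvStep PySem.Set.empty) i
        = susps.any (fun s => PySem.Dict.get? pvTriggerBlock s == some i) := by
    intro i
    rw [pv_contains_fold]
    simp [PySem.Set.empty]
  rw [show (fun (fired : PySem.Set Int) (name : String) =>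
        match PySem.Dict.get? pvTriggerBlock name with
        | some idx => PySem.Set.add fired idx
        | none => fired) = pvStep from rfl]
  simp only [pvAdvice, PySem.List.enumerate_cons, PySem.List.enumerate_nil,
    List.flatMap_cons, List.flatMap_nil, Int.reduceAdd, List.append_nil]
  rw [hfold 0, hfold 1, hfold 2, hfold 3, hfold 4]
  simp only [pv_trig0, pv_trig1, pv_trig2, pv_trig3, pv_trig4, pv_any_or, pv_any_beq]
  simp only [List.any_cons, List.any_nil, Bool.or_false, Bool.or_assoc, List.nil_append]
  by_cases c0 : ("FireServer" ∈ susps ∨ "InvokeServer" ∈ susps) <;>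
  by_cases c1 : ("loadstring" ∈ susps ∨ "LoadString" ∈ susps) <;>
  by_cases c2 : ("syn" ∈ susps ∨ "rconsole" ∈ susps ∨ "getgenv" ∈ susps ∨ "hookfunction" ∈ susps ∨ "newcclosure" ∈ susps) <;>
  by_cases c3 : ("HttpGet" ∈ susps ∨ "HttpPost" ∈ susps ∨ "RequestAsync" ∈ susps) <;>
  by_cases c4 : ("readfile" ∈ susps ∨ "writefile" ∈ susps) <;>
  simp [c0, c1, c2, c3, c4]
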